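-- pv_equiv track=rewrite | github.com/cdavidd/Computacion-Cuantica | canicas.py | canicas
-- ===== SOURCE A (Python) =====
-- def canicas(m,v,n):
--     for x in range(n):
--         r=[]
--         for i in range(len(m)):
--             cont=0
--             for j in range(len(m[0])):
--                 cont+=m[i][j]*v[j]
--             r.append(cont)
--         v=r
--     return v
-- ===== SOURCE B (Python) =====
-- def canicas(m, v, n):
--     # Exponentiation by squaring: compute M^n once, then apply to v.
--     if n <= 0:
--         return v
--     d = len(m)
--     def mul(a, b):
--         return [[sum(a[i][k] * b[k][j] for k in range(d)) for j in range(d)]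
--                 for i in range(d)]
--     p = [[1 if i == j else 0 for j in range(d)] for i in range(d)]
--     base = m
--     e = n
--     while e > 0:
--         if e & 1:
--             p = mul(p, base)
--         base = mul(base, base)
--         e >>= 1
--     return [sum(p[i][j] * v[j] for j in range(d)) for i in range(d)]
-- ===== Notes on version B (the rewrite author's own statement) =====
-- stated objective: alternative
-- what changed: Instead of applying M to v one step at a time (n matrix-vector products), B computes M^n by exponentiation by squaring and applies it to v once; this trades O(n*d^2) for O(d^3*log n), cheaper for large n but costlier when the dimension d grows with n fixed (which is what a timing run measures).
-- outside the precondition, e.g. on canicas([[1, 2]], [1, 2, 3], 1): A returns [5], B returns [1]; on canicas([[1], [2, 9]], [1], 1): A returns [1, 2], B raises IndexError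
import Mathlib
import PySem

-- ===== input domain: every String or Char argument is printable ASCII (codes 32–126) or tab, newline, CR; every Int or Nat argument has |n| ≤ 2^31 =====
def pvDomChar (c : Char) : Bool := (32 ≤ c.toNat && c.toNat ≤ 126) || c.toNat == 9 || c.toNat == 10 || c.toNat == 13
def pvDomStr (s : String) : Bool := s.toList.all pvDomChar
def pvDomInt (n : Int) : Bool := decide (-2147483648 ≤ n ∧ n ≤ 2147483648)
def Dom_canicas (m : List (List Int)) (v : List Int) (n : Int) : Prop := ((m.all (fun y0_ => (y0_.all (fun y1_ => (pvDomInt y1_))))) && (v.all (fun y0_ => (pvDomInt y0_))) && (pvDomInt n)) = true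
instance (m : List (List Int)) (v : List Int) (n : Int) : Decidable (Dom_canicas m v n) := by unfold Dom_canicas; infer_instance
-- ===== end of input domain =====

-- B computes M^n by exponentiation by squaring and applies it to v once, instead of
-- A's n successive matrix-vector products (a different algorithm; equivalence on square M).

-- ===== PORT A =====
-- for x in range(n): r = []; for i: cont = 0; for j: cont += m[i][j]*v[j]; r.append(cont); v = r
def canicas (m : List (List Int)) (v : List Int) (n : Int) : List Int :=
  (List.range n.toNat).foldl
    (fun v _ =>
      (List.range m.length).foldl
        (fun r (i : Nat) =>
          r ++ [(List.range (PySem.List.pyGetD m (0 : Int) []).length).foldl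
                  (fun cont (j : Nat) =>
                    cont + PySem.List.pyGetD (PySem.List.pyGetD m (i : Int) []) (j : Int) 0 *
                           PySem.List.pyGetD v (j : Int) 0) 0])
        [])
    v

-- ===== PORT B =====
-- mul(a,b): d×d matrix product (all indexing in range under Pre_)
def bMul (d : Nat) (a b : List (List Int)) : List (List Int) :=
  (List.range d).map (fun (i : Nat) => (List.range d).map (fun (j : Nat) =>
    ((List.range d).map (fun (k : Nat) =>
      PySem.List.pyGetD (PySem.List.pyGetD a (i : Int) []) (k : Int) 0 *
      PySem.List.pyGetD (PySem.List.pyGetD b (k : Int) []) (j : Int) 0)).sum))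

-- p = [[1 if i==j else 0 ...] ...]
def bIdent (d : Nat) : List (List Int) :=
  (List.range d).map (fun (i : Nat) => (List.range d).map (fun (j : Nat) => if i = j then (1 : Int) else 0))

-- while e > 0: if e & 1: p = mul(p, base); base = mul(base, base); e >>= 1
def bLoop (d : Nat) (p base : List (List Int)) (e : Nat) : List (List Int) :=
  if e = 0 then p
  else bLoop d (if e % 2 = 1 then bMul d p base else p) (bMul d base base) (e / 2)
termination_by e
decreasing_by exact Nat.div_lt_self (Nat.pos_of_ne_zero (by assumption)) (by norm_num)

def canicas_alt (m : List (List Int)) (v : List Int) (n : Int) : List Int :=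
  if n ≤ 0 then v
  else
    let d := m.length
    let p := bLoop d (bIdent d) m n.toNat
    (List.range d).map (fun (i : Nat) =>
      ((List.range d).map (fun (j : Nat) =>
        PySem.List.pyGetD (PySem.List.pyGetD p (i : Int) []) (j : Int) 0 *
        PySem.List.pyGetD v (j : Int) 0)).sum)

-- ===== PRECONDITION & SPEC =====
-- Pre_ excludes, for n ≥ 1, non-square m and v shorter than m's rows: there Python A
-- either raises IndexError or returns a value of a per-step shape for which the matrix
-- power M^n is not defined (B raises or returns a different-shaped value).
def Pre_canicas (m : List (List Int)) (v : List Int) (n : Int) : Prop :=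
  n ≤ 0 ∨ (m.length ≤ v.length ∧ ∀ r ∈ m, r.length = m.length)
instance (m : List (List Int)) (v : List Int) (n : Int) : Decidable (Pre_canicas m v n) := by
  unfold Pre_canicas; infer_instance

def pvWitness_canicas : List (List Int) × List Int × Int := ([[1, 1], [0, 1]], [1, 2], 3)

def Spec_canicas (m : List (List Int)) (v : List Int) (n : Int) (out : List Int) : Prop := out = canicas_alt m v n
instance (m : List (List Int)) (v : List Int) (n : Int) (out : List Int) : Decidable (Spec_canicas m v n out) := by unfold Spec_canicas; infer_instance

-- ===== CLAIM (what is proved, stated in full; the proofs are below) =====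
def Claim_equal_canicas : Prop := ∀ (m : List (List Int)) (v : List Int) (n : Int), Dom_canicas m v n → Pre_canicas m v n → Spec_canicas m v n (canicas m v n)

-- ===== LEMMAS AND PROOFS =====

-- entry (i,j) of a matrix-as-list, Python getD semantics (0 outside)
def ent (a : List (List Int)) (i j : Nat) : Int := (a.getD i []).getD j 0

-- abstract matrix-vector product of the d×d prefix
def mvec (d : Nat) (a : List (List Int)) (v : List Int) : List Int :=
  (List.range d).map (fun i => ∑ j ∈ Finset.range d, ent a i j * v.getD j 0)

theorem listsum_range (n : Nat) (f : Nat → Int) :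
    ((List.range n).map f).sum = ∑ j ∈ Finset.range n, f j := by
  induction n with
  | zero => simp
  | succ k ih => simp [List.range_succ, Finset.sum_range_succ, ih]

theorem getD_map_range' {α : Type} (d i : Nat) (f : Nat → α) (x : α) (hi : i < d) :
    ((List.range d).map f).getD i x = f i := by
  rw [List.getD_eq_getElem _ _ (by simpa using hi)]
  simp

theorem length_mvec (d : Nat) (a : List (List Int)) (v : List Int) :
    (mvec d a v).length = d := by simp [mvec]

theorem ent_bMul (d : Nat) (a b : List (List Int)) (i j : Nat) (hi : i < d) (hj : j < d) :
    ent (bMul d a b) i j = ∑ k ∈ Finset.range d, ent a i k * ent b k j := by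
  simp only [bMul, ent, PySem.List.pyGetD_natCast]
  rw [getD_map_range' d i _ [] hi, getD_map_range' d j _ 0 hj, listsum_range]

theorem getD_mvec (d : Nat) (b : List (List Int)) (v : List Int) (j : Nat) (hj : j < d) :
    (mvec d b v).getD j 0 = ∑ k ∈ Finset.range d, ent b j k * v.getD k 0 := by
  simp only [mvec]; exact getD_map_range' d j _ 0 hj

-- composition: (a·b)·v = a·(b·v)
theorem mvec_bMul (d : Nat) (a b : List (List Int)) (v : List Int) :
    mvec d (bMul d a b) v = mvec d a (mvec d b v) := by
  unfold mvec
  apply List.map_congr_left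
  intro i hi
  rw [List.mem_range] at hi
  calc ∑ j ∈ Finset.range d, ent (bMul d a b) i j * v.getD j 0
      = ∑ j ∈ Finset.range d, ∑ k ∈ Finset.range d, ent a i k * ent b k j * v.getD j 0 := by
        refine Finset.sum_congr rfl (fun j hj => ?_)
        rw [ent_bMul d a b i j hi (Finset.mem_range.mp hj), Finset.sum_mul]
    _ = ∑ k ∈ Finset.range d, ent a i k * (mvec d b v).getD k 0 := by
        rw [Finset.sum_comm]
        refine Finset.sum_congr rfl (fun k hk => ?_)
        rw [getD_mvec d b v k (Finset.mem_range.mp hk), Finset.mul_sum]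
        exact Finset.sum_congr rfl (fun j _ => by ring)

-- identity: I·w = w for length-d w
theorem mvec_bIdent (d : Nat) (w : List Int) (hw : w.length = d) :
    mvec d (bIdent d) w = w := by
  apply List.ext_getElem (by simp [mvec, hw])
  intro i h1 h2
  have hi : i < d := by simpa [mvec] using h1
  have hent : ∀ j, j < d → ent (bIdent d) i j = if i = j then 1 else 0 := by
    intro j hj
    simp only [bIdent, ent]
    rw [getD_map_range' d i _ [] hi, getD_map_range' d j _ 0 hj]
  simp only [mvec, List.getElem_map, List.getElem_range]
  rw [Finset.sum_congr rfl (fun j hj => by rw [hent j (Finset.mem_range.mp hj)])]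
  rw [Finset.sum_eq_single_of_mem i (Finset.mem_range.mpr hi)]
  · simp [List.getElem?_eq_getElem h2]
  · intro j _ hne; simp [Ne.symm hne]

-- bLoop computes p · base^e at the vector level
theorem bLoop_mvec (d : Nat) :
    ∀ (e : Nat) (p b : List (List Int)) (v : List Int),
      mvec d (bLoop d p b e) v = mvec d p ((fun w => mvec d b w)^[e] v) := by
  intro e
  induction e using Nat.strong_induction_on with
  | _ e ih =>
    intro p b v
    by_cases he : e = 0
    · subst he; simp [bLoop]
    · rw [bLoop, if_neg he]
      rw [ih (e / 2) (Nat.div_lt_self (Nat.pos_of_ne_zero he) (by norm_num))]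
      have hsq : (fun w => mvec d (bMul d b b) w) = (fun w => mvec d b w) ∘ (fun w => mvec d b w) := by
        funext w; exact mvec_bMul d b b w
      have h2k : ∀ k w, (fun w => mvec d (bMul d b b) w)^[k] w = (fun w => mvec d b w)^[2 * k] w := by
        intro k w
        rw [hsq, Function.iterate_mul]
        induction k generalizing w with
        | zero => rfl
        | succ t iht =>
          rw [Function.iterate_succ_apply, Function.iterate_succ_apply, iht]
          rfl
      rw [h2k]
      have hsplit : e = e % 2 + 2 * (e / 2) := by omega
      by_cases hodd : e % 2 = 1
      · rw [if_pos hodd, mvec_bMul]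
        conv_rhs => rw [hsplit, hodd, Function.iterate_add_apply]
        rfl
      · rw [if_neg hodd]
        conv_rhs => rw [hsplit, (by omega : e % 2 = 0), Nat.zero_add]

-- A's inner double loop is mvec m.length m, when m is square
theorem stepA_eq_mvec (m : List (List Int)) (hsq : ∀ r ∈ m, r.length = m.length) :
    (fun w => (List.range m.length).foldl
        (fun r (i : Nat) =>
          r ++ [(List.range (PySem.List.pyGetD m (0 : Int) []).length).foldl
                  (fun cont (j : Nat) =>
                    cont + PySem.List.pyGetD (PySem.List.pyGetD m (i : Int) []) (j : Int) 0 *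
                           PySem.List.pyGetD w (j : Int) 0) 0])
        [])
    = (fun w => mvec m.length m w) := by
  funext w
  have hlen0 : (PySem.List.pyGetD m (0 : Int) []).length =
      (if m.length = 0 then 0 else m.length) := by
    cases m with
    | nil => simp [PySem.List.pyGetD_zero]
    | cons r t =>
      rw [PySem.List.pyGetD_zero_cons]
      simp [hsq r (by simp)]
  rw [PySem.List.foldl_append_singleton_eq_map]
  unfold mvec
  apply List.map_congr_left
  intro i hi
  rw [List.mem_range] at hi
  rw [PySem.List.foldl_add]
  rw [hlen0, if_neg (by omega)]
  rw [listsum_range]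
  simp only [PySem.List.pyGetD_natCast, zero_add]
  rfl

-- for x in range(k): v = s(v)  is  s^[k] v
theorem foldl_const_iterate {α : Type} (s : α → α) (k : Nat) (v : α) :
    (List.range k).foldl (fun w _ => s w) v = s^[k] v := by
  induction k generalizing v with
  | zero => rfl
  | succ t ih =>
    rw [List.range_succ, List.foldl_append, ih]
    simp [Function.iterate_succ_apply']

-- ===== VERDICT (by name: the statement is the Claim_ definition above) =====
theorem canicas_spec : Claim_equal_canicas := by
  intro m v n _ pre
  unfold Spec_canicas
  by_cases hn : n ≤ 0
  · have : n.toNat = 0 := Int.toNat_of_nonpos hn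
    simp [canicas, canicas_alt, this, hn]
  · have hpre : m.length ≤ v.length ∧ ∀ r ∈ m, r.length = m.length := by
      rcases pre with h | h
      · exact absurd h hn
      · exact h
    have hsq := hpre.2
    have hpos : 0 < n := by omega
    have htn : 1 ≤ n.toNat := by omega
    -- A as iterate of mvec
    have hA : canicas m v n = (fun w => mvec m.length m w)^[n.toNat] v := by
      unfold canicas
      rw [foldl_const_iterate]
      rw [← stepA_eq_mvec m hsq]
    -- B's final multiply is mvec of bLoop's result
    have hB : canicas_alt m v n =
        mvec m.length (bLoop m.length (bIdent m.length) m n.toNat) v := by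
      unfold canicas_alt
      rw [if_neg hn]
      unfold mvec
      apply List.map_congr_left
      intro i hi
      rw [List.mem_range] at hi
      rw [listsum_range]
      refine Finset.sum_congr rfl (fun j hj => ?_)
      simp only [PySem.List.pyGetD_natCast, ent]
    rw [hA, hB, bLoop_mvec]
    -- I · w = w since w = mvec … has length m.length (n.toNat ≥ 1)
    obtain ⟨t, ht⟩ : ∃ t, n.toNat = t + 1 := ⟨n.toNat - 1, by omega⟩
    rw [ht, Function.iterate_succ_apply']
    rw [mvec_bIdent m.length _ (length_mvec _ _ _)]
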